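-- pv_equiv track=rewrite | github.com/OreoFrappuccino2000/frame-extraction | skills_node.py | anonymize_player_names
-- ===== SOURCE A (Python) =====
-- from typing import Dict, List, Any, Optional, Tuple
--
-- def anonymize_player_names(data: List[Dict]) -> List[Dict]:
--     """玩家名称模糊化"""
--     anonymized = []
--     name_mapping = {}
--     anonymization_terms = ["这边这个人", "对面", "这波人", "这一队", "刚刚那个", "有人", "一个人", "另一边"]
--
--     for item in data:
--         anonymized_item = item.copy()
--
--         # 模糊化玩家名称字段
--         for field in ["actor", "target", "player"]:
--             if field in anonymized_item and anonymized_item[field]: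
--                 original_name = anonymized_item[field]
--
--                 # 如果还没有映射，创建新的模糊名称
--                 if original_name not in name_mapping:
--                     term_index = len(name_mapping) % len(anonymization_terms)
--                     name_mapping[original_name] = anonymization_terms[term_index]
--
--                 anonymized_item[field] = name_mapping[original_name]
--
--         # 模糊化团队名称字段
--         for field in ["team", "target_team"]:
--             if field in anonymized_item and anonymized_item[field]:
--                 # 团队名称简化为数字或模糊描述
--                 team_id = anonymized_item[field]
--                 if team_id.isdigit():
--                     anonymized_item[field] = f"{team_id}队"
--                 else:
--                     anonymized_item[field] = "这一队"
--
--         anonymized.append(anonymized_item)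
--
--     return anonymized
-- ===== SOURCE B (Python) =====
-- def anonymize_player_names(data):
--     """玩家名称模糊化 — two-pass variant: build the full name mapping first, then transform."""
--     terms = ["这边这个人", "对面", "这波人", "这一队", "刚刚那个", "有人", "一个人", "另一边"]
--     mapping = {}
--     for item in data:
--         for field in ("actor", "target", "player"):
--             name = item.get(field)
--             if name and name not in mapping:
--                 mapping[name] = terms[len(mapping) % len(terms)]
--     return [_transform(item, mapping) for item in data]
--
--
-- def _transform(item, mapping):
--     out = item.copy()
--     for field in ("actor", "target", "player"):
--         name = out.get(field)
--         if name:
--             out[field] = mapping.get(name, name)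
--     for field in ("team", "target_team"):
--         tid = out.get(field)
--         if tid:
--             out[field] = f"{tid}队" if tid.isdigit() else "这一队"
--     return out
-- ===== Notes on version B (the rewrite author's own statement) =====
-- stated objective: simpler
-- what changed: B splits A's single interleaved loop into two passes: a first pass that builds the complete name mapping up front, then a map over the data that shallow-copies each item and substitutes player and team fields from the prebuilt mapping.
import Mathlib
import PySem

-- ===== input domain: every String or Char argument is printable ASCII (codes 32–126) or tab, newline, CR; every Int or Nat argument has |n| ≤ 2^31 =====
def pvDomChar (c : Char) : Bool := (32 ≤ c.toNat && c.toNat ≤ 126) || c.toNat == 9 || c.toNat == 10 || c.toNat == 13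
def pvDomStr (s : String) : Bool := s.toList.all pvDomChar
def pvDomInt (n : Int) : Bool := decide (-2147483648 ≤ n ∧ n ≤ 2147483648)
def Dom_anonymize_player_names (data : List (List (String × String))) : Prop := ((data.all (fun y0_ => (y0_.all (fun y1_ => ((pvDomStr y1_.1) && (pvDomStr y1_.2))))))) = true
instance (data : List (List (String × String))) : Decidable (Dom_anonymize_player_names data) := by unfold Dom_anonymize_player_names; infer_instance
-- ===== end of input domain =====

-- B builds the whole name mapping in a first pass and then transforms each item in a second pass,
-- instead of A's single pass that interleaves mapping growth with item rewriting; objective: simpler decomposition.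


-- ===== PORT A =====
def aTerms : List String := ["这边这个人", "对面", "这波人", "这一队", "刚刚那个", "有人", "一个人", "另一边"]

-- A's inner player-field step: updates (anonymized_item, name_mapping) together
def aPlayerStep (p : PySem.Dict String String × PySem.Dict String String) (field : String) :
    PySem.Dict String String × PySem.Dict String String :=
  match p.1.get? field with
  | none => p
  | some original_name =>
    if original_name = "" then p
    else
      let m := if p.2.contains original_name then p.2
               else p.2.insert original_name
                 (PySem.List.pyGetD aTerms ((p.2.size % aTerms.length : Nat) : Int) "")
      (p.1.insert field (m.getD original_name ""), m)

-- A's team-field step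
def aTeamStep (it : PySem.Dict String String) (field : String) : PySem.Dict String String :=
  match it.get? field with
  | none => it
  | some team_id =>
    if team_id = "" then it
    else if PySem.Str.strIsdigit team_id then it.insert field (team_id ++ "队")
    else it.insert field "这一队"

def aItemStep (st : List (List (String × String)) × PySem.Dict String String)
    (item : List (String × String)) : List (List (String × String)) × PySem.Dict String String :=
  let p := ["actor", "target", "player"].foldl aPlayerStep (PySem.Dict.ofList item, st.2)
  let it2 := ["team", "target_team"].foldl aTeamStep p.1
  (st.1 ++ [it2.items], p.2)

def anonymize_player_names (data : List (List (String × String))) : List (List (String × String)) :=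
  (data.foldl aItemStep ([], PySem.Dict.empty)).1

-- ===== PORT B =====
def bTerms : List String := ["这边这个人", "对面", "这波人", "这一队", "刚刚那个", "有人", "一个人", "另一边"]

-- pass 1: register one player field of one (immutable) item into the mapping
def bRegField (item : PySem.Dict String String) (m : PySem.Dict String String) (field : String) :
    PySem.Dict String String :=
  match item.get? field with
  | none => m
  | some name =>
    if name = "" then m
    else if m.contains name then m
    else m.insert name (PySem.List.pyGetD bTerms ((m.size % bTerms.length : Nat) : Int) "")

def bBuildMapping (data : List (List (String × String))) : PySem.Dict String String :=
  data.foldl (fun m item => ["actor", "target", "player"].foldl (bRegField (PySem.Dict.ofList item)) m)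
    PySem.Dict.empty

-- pass 2: substitute one player field using the prebuilt mapping
def bSubField (m : PySem.Dict String String) (out : PySem.Dict String String) (field : String) :
    PySem.Dict String String :=
  match out.get? field with
  | none => out
  | some name => if name = "" then out else out.insert field (m.getD name name)

def bTeamStep (out : PySem.Dict String String) (field : String) : PySem.Dict String String :=
  match out.get? field with
  | none => out
  | some tid =>
    if tid = "" then out
    else if PySem.Str.strIsdigit tid then out.insert field (tid ++ "队")
    else out.insert field "这一队"

def anonymize_player_names_alt (data : List (List (String × String))) : List (List (String × String)) :=
  let m := bBuildMapping data
  data.map (fun item =>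
    (["team", "target_team"].foldl bTeamStep
      (["actor", "target", "player"].foldl (bSubField m) (PySem.Dict.ofList item))).items)

-- ===== PRECONDITION & SPEC =====
def Spec_anonymize_player_names (data : List (List (String × String))) (out : List (List (String × String))) : Prop := out = anonymize_player_names_alt data
instance (data : List (List (String × String))) (out : List (List (String × String))) : Decidable (Spec_anonymize_player_names data out) := by unfold Spec_anonymize_player_names; infer_instance

-- ===== CLAIM (what is proved, stated in full; the proofs are below) =====
def Claim_equal_anonymize_player_names : Prop := ∀ (data : List (List (String × String))), Dom_anonymize_player_names data → Spec_anonymize_player_names data (anonymize_player_names data)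

-- ===== LEMMAS AND PROOFS =====

-- "m' extends m": every key already in m keeps its lookup
def ExtD (m m' : PySem.Dict String String) : Prop :=
  ∀ k, m.contains k = true → m'.get? k = m.get? k

theorem extD_refl (m : PySem.Dict String String) : ExtD m m := fun _ _ => rfl

theorem extD_trans {m1 m2 m3 : PySem.Dict String String} (h12 : ExtD m1 m2) (h23 : ExtD m2 m3) :
    ExtD m1 m3 := by
  intro k hk
  have hk2 : m2.contains k = true := by
    cases h : m2.contains k
    · exfalso
      have hn : m2.get? k = none := (PySem.Dict.get?_eq_none_iff_contains m2 k).mpr h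
      rw [h12 k hk] at hn
      have := (PySem.Dict.get?_eq_none_iff_contains m1 k).mp hn
      rw [hk] at this; cases this
    · rfl
  rw [h23 k hk2, h12 k hk]

theorem extD_reg (item m : PySem.Dict String String) (f : String) : ExtD m (bRegField item m f) := by
  unfold bRegField
  cases hg : item.get? f with
  | none => exact extD_refl m
  | some name =>
    dsimp only
    split_ifs with h1 h2
    · exact extD_refl m
    · exact extD_refl m
    · intro k hk
      refine PySem.Dict.get?_insert_of_ne m _ (fun hkn => ?_)
      exact h2 (hkn ▸ hk)

theorem extD_regList (item : PySem.Dict String String) (fs : List String) :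
    ∀ m, ExtD m (fs.foldl (bRegField item) m) := by
  induction fs with
  | nil => exact fun m => extD_refl m
  | cons f fs ih =>
    intro m
    exact extD_trans (extD_reg item m f) (ih (bRegField item m f))

theorem extD_build (data : List (List (String × String))) :
    ∀ m, ExtD m (data.foldl (fun m item => ["actor", "target", "player"].foldl (bRegField (PySem.Dict.ofList item)) m) m) := by
  induction data with
  | nil => exact fun m => extD_refl m
  | cons item rest ih =>
    intro m
    exact extD_trans (extD_regList (PySem.Dict.ofList item) _ m) (ih _)

-- registration only reads the fields in fs: items agreeing there register identically
theorem reg_congr (it1 it2 : PySem.Dict String String) (fs : List String)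
    (h : ∀ g ∈ fs, it1.get? g = it2.get? g) :
    ∀ m, fs.foldl (bRegField it1) m = fs.foldl (bRegField it2) m := by
  induction fs with
  | nil => exact fun _ => rfl
  | cons f fs ih =>
    intro m
    have hf : it1.get? f = it2.get? f := h f (by simp)
    have hs : bRegField it1 m f = bRegField it2 m f := by unfold bRegField; rw [hf]
    simp only [List.foldl_cons, hs]
    exact ih (fun g hg => h g (by simp [hg])) _

-- the central per-item lemma: A's combined player fold = (B's substitution with any extension M, B's registration)
theorem player_fold (fs : List String) (hnd : fs.Nodup) :
    ∀ (it m M : PySem.Dict String String), ExtD (fs.foldl (bRegField it) m) M →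
    fs.foldl aPlayerStep (it, m) = (fs.foldl (bSubField M) it, fs.foldl (bRegField it) m) := by
  induction fs with
  | nil => intro it m M _; rfl
  | cons f fs ih =>
    intro it m M hM
    have hnf : f ∉ fs := (List.nodup_cons.mp hnd).1
    have hnd' : fs.Nodup := (List.nodup_cons.mp hnd).2
    simp only [List.foldl_cons] at hM ⊢
    cases hg : it.get? f with
    | none =>
      have ha : aPlayerStep (it, m) f = (it, m) := by unfold aPlayerStep; rw [hg]
      have hb : bRegField it m f = m := by unfold bRegField; rw [hg]
      have hc : bSubField M it f = it := by unfold bSubField; rw [hg]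
      rw [ha, hb, hc]
      rw [hb] at hM
      exact ih hnd' it m M hM
    | some name =>
      by_cases he : name = ""
      · have ha : aPlayerStep (it, m) f = (it, m) := by
          unfold aPlayerStep; rw [hg]; simp [he]
        have hb : bRegField it m f = m := by unfold bRegField; rw [hg]; simp [he]
        have hc : bSubField M it f = it := by unfold bSubField; rw [hg]; simp [he]
        rw [ha, hb, hc]
        rw [hb] at hM
        exact ih hnd' it m M hM
      · -- truthy name: A registers (if fresh) and substitutes; B's two passes do the same separately
        have hterms : bTerms = aTerms := rfl
        set m1 : PySem.Dict String String :=
          if m.contains name then m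
          else m.insert name (PySem.List.pyGetD aTerms ((m.size % aTerms.length : Nat) : Int) "") with hm1
        have hb : bRegField it m f = m1 := by
          unfold bRegField; rw [hg]; dsimp only; rw [if_neg he, hterms, ← hm1]
        have hcont : m1.contains name = true := by
          rw [hm1]; split_ifs with h
          · exact h
          · rw [PySem.Dict.contains_insert]; simp
        obtain ⟨v, hv⟩ : ∃ v, m1.get? name = some v := by
          cases hq : m1.get? name with
          | none =>
            have := (PySem.Dict.get?_eq_none_iff_contains m1 name).mp hq
            rw [hcont] at this; cases this
          | some v => exact ⟨v, rfl⟩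
        rw [hb] at hM
        have hMm1 : ExtD m1 M := extD_trans (extD_regList it fs m1) hM
        have hMv : M.get? name = some v := by rw [hMm1 name hcont, hv]
        have hval : m1.getD name "" = M.getD name name := by
          simp [PySem.Dict.getD_eq_get?_getD, hv, hMv]
        have ha : aPlayerStep (it, m) f = (it.insert f (m1.getD name ""), m1) := by
          unfold aPlayerStep; rw [hg]; dsimp only; rw [if_neg he, ← hm1]
        have hc : bSubField M it f = it.insert f (M.getD name name) := by
          unfold bSubField; rw [hg]; dsimp only; rw [if_neg he]
        have hit' : ∀ g ∈ fs, (it.insert f (M.getD name name)).get? g = it.get? g := by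
          intro g hgm
          exact PySem.Dict.get?_insert_of_ne it _ (fun hgf => hnf (hgf ▸ hgm))
        have hregsw : fs.foldl (bRegField (it.insert f (M.getD name name))) m1 = fs.foldl (bRegField it) m1 :=
          reg_congr _ _ fs hit' m1
        rw [ha, hc, hval, hb, ← hregsw]
        rw [← hregsw] at hM
        exact ih hnd' _ m1 M hM

theorem team_eq : aTeamStep = bTeamStep := rfl

-- the main loop, generalized over accumulator and starting mapping
theorem main_fold (data : List (List (String × String))) :
    ∀ (acc : List (List (String × String))) (m : PySem.Dict String String),
    (data.foldl aItemStep (acc, m)).1 =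
      acc ++ data.map (fun item =>
        (["team", "target_team"].foldl bTeamStep
          (["actor", "target", "player"].foldl
            (bSubField (data.foldl (fun m item => ["actor", "target", "player"].foldl (bRegField (PySem.Dict.ofList item)) m) m))
            (PySem.Dict.ofList item))).items) := by
  induction data with
  | nil => intro acc m; simp
  | cons item rest ih =>
    intro acc m
    simp only [List.foldl_cons, List.map_cons]
    have hnd : (["actor", "target", "player"] : List String).Nodup := by decide
    set m1 := ["actor", "target", "player"].foldl (bRegField (PySem.Dict.ofList item)) m with hm1
    have hM : ExtD m1 (rest.foldl (fun m item => ["actor", "target", "player"].foldl (bRegField (PySem.Dict.ofList item)) m) m1) :=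
      extD_build rest m1
    have hp := player_fold _ hnd (PySem.Dict.ofList item) m _ hM
    have hstep : aItemStep (acc, m) item =
        (acc ++ [(["team", "target_team"].foldl aTeamStep
          (["actor", "target", "player"].foldl
            (bSubField (rest.foldl (fun m item => ["actor", "target", "player"].foldl (bRegField (PySem.Dict.ofList item)) m) m1))
            (PySem.Dict.ofList item))).items], m1) := by
      unfold aItemStep; rw [hp]
    rw [hstep, ih, team_eq]
    simp only [hm1, List.foldl_cons, List.append_assoc, List.singleton_append]

-- ===== VERDICT (by name: the statement is the Claim_ definition above) =====
theorem anonymize_player_names_spec : Claim_equal_anonymize_player_names := by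
  intro data _
  unfold Spec_anonymize_player_names anonymize_player_names anonymize_player_names_alt bBuildMapping
  exact main_fold data [] PySem.Dict.empty
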